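-- pv_equiv track=rewrite | github.com/carrdelling/google_codejam | 2013/Qualification/ProblemB/problemB.py | solve
-- ===== SOURCE A (Python) =====
-- def solve(n, m, board):
--
--     field = [[100] * m] * n
--
--     # cut rows
--     for i in range(n):
--         h = max(board[i])
--         field[i] = [h] * m
--
--     # cut columns
--     transpose_field = [list(x) for x in zip(*field)]
--     transpose_board = [list(x) for x in zip(*board)]
--
--     for i in range(m):
--         h = max(transpose_board[i])
--         for j in range(n):
--             transpose_field[i][j] = min(transpose_field[i][j], h)
--
--     # compare output
--     final_field = [list(x) for x in zip(*transpose_field)]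
--
--     for i in range(n):
--         for j in range(m):
--             if final_field[i][j] != board[i][j]:
--                 return 'NO'
--
--     return 'YES'
-- ===== SOURCE B (Python) =====
-- def solve(n, m, board):
--     # A cell is unreachable iff something strictly greater exists both in its row
--     # and in its column; the columns are materialized once, no maxima are computed.
--     cols = [[r[j] for r in board] for j in range(m)]
--     for i in range(n):
--         row = board[i]
--         for j in range(m):
--             v = row[j]
--             if any(x > v for x in row) and any(c > v for c in cols[j]):
--                 return 'NO'
--     return 'YES'
-- ===== Notes on version B (the rewrite author's own statement) =====
-- stated objective: alternative
-- what changed: B computes no maxima and builds no candidate field: it materializes the columns once and answers 'NO' exactly when some cell has a strictly greater element both in its row and in its column (a pure existence-of-dominator test), instead of A's 2D field construction, three zip-transposes and min-of-maxima comparison.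
import Mathlib
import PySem

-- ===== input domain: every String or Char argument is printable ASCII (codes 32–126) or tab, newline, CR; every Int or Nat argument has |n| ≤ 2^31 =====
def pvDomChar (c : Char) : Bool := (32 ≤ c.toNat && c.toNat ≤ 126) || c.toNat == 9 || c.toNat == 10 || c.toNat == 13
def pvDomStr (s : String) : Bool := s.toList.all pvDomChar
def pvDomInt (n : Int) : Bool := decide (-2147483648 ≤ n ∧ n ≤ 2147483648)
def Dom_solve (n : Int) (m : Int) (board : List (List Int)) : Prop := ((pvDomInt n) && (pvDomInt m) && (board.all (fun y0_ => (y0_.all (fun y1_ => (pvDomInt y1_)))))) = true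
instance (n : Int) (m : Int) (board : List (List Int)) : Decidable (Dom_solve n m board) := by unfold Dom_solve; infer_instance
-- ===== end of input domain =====

-- B drops A's field construction, maxima and transposes entirely: it answers 'NO' exactly
-- when some cell is strictly dominated both inside its row and inside its column —
-- a pure existence test, genuinely a different algorithm at similar small-input cost.


-- ===== PORT A =====
-- zip(*xss) for a list of rows: rows truncated to the shortest row (exact for Python's zip).
-- Fuel = length of the first row, an upper bound on the shortest row; the isEmpty test stops
-- exactly at the shortest row, as zip does.
def pyTransposeGo (fuel : Nat) (xss : List (List Int)) : List (List Int) :=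
  match fuel with
  | 0 => []
  | k+1 =>
    if xss.any (fun r => r.isEmpty) then []
    else (xss.map (fun r => r.headD 0)) :: pyTransposeGo k (xss.map (fun r => r.tail))

def pyTranspose (xss : List (List Int)) : List (List Int) :=
  match xss with
  | [] => []
  | r :: _ => pyTransposeGo r.length xss

def solve (n : Int) (m : Int) (board : List (List Int)) : String :=
  -- field = [[100]*m]*n, then 'for i in range(n): field[i] = [max(board[i])]*m':
  -- the loop assigns every index of field (len(field) = len(range(n))), so the loop result is this map
  let field := (PySem.List.pyRange 0 n 1).map (fun i =>
      List.replicate m.toNat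
        ((PySem.List.max? ((PySem.List.pyGet? board i).getD []) (fun x => x)).getD 0))
  let tfield := pyTranspose field
  let tboard := pyTranspose board
  -- for i in range(m): h = max(transpose_board[i]); for j in range(n): transpose_field[i][j] = min(..., h)
  let tfield2 := (PySem.List.pyRange 0 m 1).foldl (fun tf i =>
      let h := (PySem.List.max? ((PySem.List.pyGet? tboard i).getD []) (fun x => x)).getD 0
      PySem.List.pySetD tf i
        ((PySem.List.pyRange 0 n 1).foldl (fun row j =>
            PySem.List.pySetD row j (min (PySem.List.pyGetD row j 0) h))
          (PySem.List.pyGetD tf i []))) tfield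
  let final := pyTranspose tfield2
  -- for i in range(n): for j in range(m): if final_field[i][j] != board[i][j]: return 'NO'
  if (PySem.List.pyRange 0 n 1).any (fun i => (PySem.List.pyRange 0 m 1).any (fun j =>
      PySem.List.pyGetD (PySem.List.pyGetD final i []) j 0 ≠
        PySem.List.pyGetD (PySem.List.pyGetD board i []) j 0))
  then "NO" else "YES"

-- ===== PORT B =====
def solve_alt (n : Int) (m : Int) (board : List (List Int)) : String :=
  let cols := (PySem.List.pyRange 0 m 1).map (fun j =>
      board.map (fun r => PySem.List.pyGetD r j 0))
  if (PySem.List.pyRange 0 n 1).any (fun i =>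
      let row := (PySem.List.pyGet? board i).getD []
      (PySem.List.pyRange 0 m 1).any (fun j =>
        let v := PySem.List.pyGetD row j 0
        row.any (fun x => decide (x > v)) &&
          (PySem.List.pyGetD cols j []).any (fun c => decide (c > v))))
  then "NO" else "YES"

-- ===== PRECONDITION & SPEC =====
-- Pre_ is exactly the set of inputs on which A returns normally: it excludes only the
-- inputs where A raises — n > len(board) or an empty row among the first n (ValueError/
-- IndexError in the row pass), or m ≥ 1 while some row is shorter than m or the board is
-- empty (IndexError past the end of zip's truncated transpose).
def Pre_solve (n : Int) (m : Int) (board : List (List Int)) : Prop :=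
  n ≤ (board.length : Int) ∧ (∀ r ∈ board.take n.toNat, r ≠ []) ∧
  (1 ≤ m → board ≠ [] ∧ ∀ r ∈ board, m ≤ (r.length : Int))
instance (n : Int) (m : Int) (board : List (List Int)) : Decidable (Pre_solve n m board) := by
  unfold Pre_solve; infer_instance

def pvWitness_solve : Int × Int × List (List Int) := (2, 2, [[2, 1], [1, 2]])

def Spec_solve (n : Int) (m : Int) (board : List (List Int)) (out : String) : Prop := out = solve_alt n m board
instance (n : Int) (m : Int) (board : List (List Int)) (out : String) : Decidable (Spec_solve n m board out) := by unfold Spec_solve; infer_instance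

-- ===== CLAIM (what is proved, stated in full; the proofs are below) =====
def Claim_equal_solve : Prop := ∀ (n : Int) (m : Int) (board : List (List Int)), Dom_solve n m board → Pre_solve n m board → Spec_solve n m board (solve n m board)

-- ===== LEMMAS AND PROOFS =====

-- row maximum / column maximum / the mismatch test, the canonical form both ports reduce to
def rmaxC (board : List (List Int)) (k : Nat) : Int :=
  (PySem.List.max? (board.getD k []) (fun x => x)).getD 0
def cmaxC (board : List (List Int)) (j : Nat) : Int :=
  (PySem.List.max? (board.map (fun r => r.getD j 0)) (fun x => x)).getD 0
def mismatchC (N M : Nat) (board : List (List Int)) : Bool :=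
  (List.range N).any (fun k => (List.range M).any (fun j =>
    decide ((board.getD k []).getD j 0 ≠ min (rmaxC board k) (cmaxC board j))))

theorem getD_tail (r : List Int) (j : Nat) (d : Int) : r.tail.getD j d = r.getD (j+1) d := by
  cases r <;> simp [List.getD]

theorem pyTransposeGo_rect (M : Nat) : ∀ (xss : List (List Int)), xss ≠ [] →
    (∀ r ∈ xss, r.length = M) →
    pyTransposeGo M xss = (List.range M).map (fun j => xss.map (fun r => r.getD j 0)) := by
  induction M with
  | zero => intro xss _ _; simp [pyTransposeGo]
  | succ M ih =>
    intro xss hne hlen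
    have hany : xss.any (fun r => r.isEmpty) = false := by
      simp only [List.any_eq_false]
      intro r hr
      have h := hlen r hr
      cases r with
      | nil => simp at h
      | cons a t => simp
    rw [pyTransposeGo, if_neg (by simp [hany])]
    have h1 : ∀ r ∈ xss.map (fun r => r.tail), r.length = M := by
      intro r hr
      simp only [List.mem_map] at hr
      obtain ⟨s, hs, rfl⟩ := hr
      have := hlen s hs; simp [this]
    have h2 : xss.map (fun r => r.tail) ≠ [] := by
      cases xss <;> simp_all
    rw [ih _ h2 h1, List.range_succ_eq_map]
    simp only [List.map_cons, List.map_map]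
    congr 1
    · apply List.map_congr_left
      intro r hr
      have h := hlen r hr
      cases r with
      | nil => simp at h
      | cons a t => simp [List.getD]
    · apply List.map_congr_left
      intro j _
      simp only [Function.comp]
      apply List.map_congr_left
      intro r _
      exact getD_tail r j 0

theorem pyTranspose_rect (M : Nat) (xss : List (List Int)) (hne : xss ≠ [])
    (hlen : ∀ r ∈ xss, r.length = M) :
    pyTranspose xss = (List.range M).map (fun j => xss.map (fun r => r.getD j 0)) := by
  cases xss with
  | nil => exact absurd rfl hne
  | cons r t =>
    have hr : r.length = M := hlen r (by simp)
    simp only [pyTranspose]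
    rw [hr]
    exact pyTransposeGo_rect M (r :: t) hne hlen

-- a left fold that sets index i to F i (state[i]) for i = 0 .. k-1: each index is written once
theorem foldl_set_range {α : Type} (F : Nat → α → α) (d : α) :
    ∀ (k : Nat) (s : List α), k ≤ s.length →
    ((List.range k).foldl (fun st i => st.set i (F i (st.getD i d))) s)
      = s.mapIdx (fun i a => if i < k then F i a else a) := by
  intro k
  induction k with
  | zero =>
    intro s _
    apply List.ext_getElem <;> simp
  | succ k ih =>
    intro s hk
    rw [List.range_succ, List.foldl_append, List.foldl_cons, List.foldl_nil,
      ih s (by omega)]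
    apply List.ext_getElem
    · simp
    · intro i h1 h2
      simp only [List.length_set, List.length_mapIdx] at h1 h2
      rw [List.getElem_set, List.getElem_mapIdx, List.getElem_mapIdx]
      have hgd : (s.mapIdx fun i a => if i < k then F i a else a).getD k d = s[k]'(by omega) := by
        rw [List.getD_eq_getElem _ _ (by simpa using hk), List.getElem_mapIdx]
        simp
      by_cases hik : k = i
      · subst hik
        rw [if_pos rfl, hgd, if_pos (by omega)]
      · rw [if_neg hik]
        rcases Nat.lt_or_ge i k with h | h
        · rw [if_pos h, if_pos (by omega)]
        · rw [if_neg (by omega), if_neg (by omega)]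

theorem mapIdx_map_range {α β : Type} (M : Nat) (g : Nat → α) (f : Nat → α → β) :
    ((List.range M).map g).mapIdx (fun i a => f i a) = (List.range M).map (fun j => f j (g j)) := by
  apply List.ext_getElem
  · simp
  · intro i h1 h2
    simp

theorem bool_eq_of_iff {a b : Bool} (h : a = true ↔ b = true) : a = b := by
  cases a <;> cases b <;> simp_all

theorem any_range_congr (N : Nat) (f g : Nat → Bool) (h : ∀ k, k < N → f k = g k) :
    (List.range N).any f = (List.range N).any g := by
  apply bool_eq_of_iff
  simp only [List.any_eq_true]
  constructor
  · rintro ⟨x, hx, hp⟩; exact ⟨x, hx, (h x (List.mem_range.mp hx)) ▸ hp⟩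
  · rintro ⟨x, hx, hp⟩; exact ⟨x, hx, (h x (List.mem_range.mp hx)).symm ▸ hp⟩

theorem map_range_congr {β : Type} (N : Nat) (f g : Nat → β) (h : ∀ k, k < N → f k = g k) :
    (List.range N).map f = (List.range N).map g :=
  List.map_congr_left (fun k hk => h k (List.mem_range.mp hk))

theorem pyTransposeGo_getElem? (fuel : Nat) : ∀ (xss : List (List Int)) (j : Nat), j < fuel →
    (∀ r ∈ xss, j < r.length) →
    (pyTransposeGo fuel xss)[j]? = some (xss.map (fun r => r.getD j 0)) := by
  induction fuel with
  | zero => intro xss j hj _; omega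
  | succ fuel ih =>
    intro xss j hj hr
    have hany : xss.any (fun r => r.isEmpty) = false := by
      simp only [List.any_eq_false]
      intro r hmem
      have h := hr r hmem
      cases r with
      | nil => simp at h
      | cons a t => simp
    rw [pyTransposeGo, if_neg (by simp [hany])]
    cases j with
    | zero =>
      simp only [List.getElem?_cons_zero]
      congr 1
      apply List.map_congr_left
      intro r hmem
      have h := hr r hmem
      cases r with
      | nil => simp at h
      | cons a t => simp [List.getD]
    | succ j =>
      rw [List.getElem?_cons_succ, ih (xss.map (fun r => r.tail)) j (by omega)
        (by intro r hmem; simp only [List.mem_map] at hmem; obtain ⟨t, ht, rfl⟩ := hmem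
            have h := hr t ht; simp only [List.length_tail]; omega)]
      congr 1
      rw [List.map_map]
      apply List.map_congr_left
      intro r _
      simp only [Function.comp_apply]
      exact getD_tail r j 0

theorem pyTranspose_getElem? (xss : List (List Int)) (hne : xss ≠ []) (j : Nat)
    (hj : ∀ r ∈ xss, j < r.length) :
    (pyTranspose xss)[j]? = some (xss.map (fun r => r.getD j 0)) := by
  cases xss with
  | nil => exact absurd rfl hne
  | cons r t =>
    simp only [pyTranspose]
    exact pyTransposeGo_getElem? r.length (r :: t) j (hj r (by simp)) hj

-- port A computes the canonical mismatch test
theorem solveA_canon (N M : Nat) (board : List (List Int))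
    (hNL : N ≤ board.length) (hlen : ∀ r ∈ board, M ≤ r.length)
    (hnz : 0 < N) (hmz : 0 < M) :
    solve (N : Int) (M : Int) board = if mismatchC N M board then "NO" else "YES" := by
  have hbne : board ≠ [] := List.ne_nil_of_length_pos (by omega)
  simp only [solve, mismatchC]
  congr 1
  apply congrArg (fun b : Bool => b = true)
  -- step 1: the row-cut field
  have h1 : (PySem.List.pyRange 0 ((N : Nat) : Int) 1).map (fun i =>
        List.replicate ((M : Nat) : Int).toNat
          ((PySem.List.max? ((PySem.List.pyGet? board i).getD []) (fun x => x)).getD 0))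
      = (List.range N).map (fun k => List.replicate M (rmaxC board k)) := by
    rw [PySem.List.pyRange_zero_natCast, List.map_map]
    apply map_range_congr
    intro k hk
    simp only [Function.comp_apply, Int.toNat_natCast]
    congr 1
    simp [rmaxC, List.getD_eq_getElem?_getD]
  rw [h1]
  -- step 2: its transpose, M identical rows of row maxima
  have h2 : pyTranspose ((List.range N).map (fun k => List.replicate M (rmaxC board k)))
      = (List.range M).map (fun _j => (List.range N).map (fun k => rmaxC board k)) := by
    rw [pyTranspose_rect M _ (by apply List.ne_nil_of_length_pos; simpa using hnz)
      (by intro r hr; simp only [List.mem_map] at hr; obtain ⟨k, _, rfl⟩ := hr; simp)]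
    apply map_range_congr
    intro j hj
    rw [List.map_map]
    apply map_range_congr
    intro k hk
    simp only [Function.comp_apply]
    rw [List.getD_eq_getElem _ _ (by simpa using hj)]
    simp
  rw [h2]
  -- step 3: normalise ranges, folds and indexing to Nat form
  simp only [PySem.List.pyRange_zero_natCast, List.foldl_map, List.any_map,
    PySem.List.pySetD_natCast, PySem.List.pyGetD_natCast, PySem.List.pyGet?_natCast]
  -- step 4: the column-cut fold writes each row j once
  have hOut := foldl_set_range (α := List Int)
    (F := fun k row => List.foldl (fun row (jj : Nat) => row.set jj (min (row.getD jj 0)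
        ((PySem.List.max? ((pyTranspose board)[k]?.getD [])
          (fun x => x)).getD 0))) row (List.range N))
    (d := ([] : List Int)) M
    ((List.range M).map (fun _j => (List.range N).map (fun k => rmaxC board k)))
    (by simp)
  simp only [] at hOut
  rw [hOut, mapIdx_map_range]
  -- step 5: evaluate each written row
  have h5 : (List.range M).map (fun j => if j < M then
        List.foldl (fun row (jj : Nat) => row.set jj (min (row.getD jj 0)
          ((PySem.List.max? ((pyTranspose board)[j]?.getD [])
            (fun x => x)).getD 0))) ((List.range N).map (fun k => rmaxC board k)) (List.range N)
        else (List.range N).map (fun k => rmaxC board k))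
      = (List.range M).map (fun j => (List.range N).map (fun k =>
          min (rmaxC board k) (cmaxC board j))) := by
    apply map_range_congr
    intro j hj
    rw [if_pos hj]
    have hIn := foldl_set_range (α := Int)
      (F := fun _i v => min v ((PySem.List.max? ((pyTranspose board)[j]?.getD [])
        (fun x => x)).getD 0))
      (d := (0 : Int)) N
      ((List.range N).map (fun k => rmaxC board k))
      (by simp)
    simp only [] at hIn
    rw [hIn, mapIdx_map_range]
    apply map_range_congr
    intro k hk
    rw [if_pos hk]
    congr 1
    rw [pyTranspose_getElem? board hbne j (fun r hr => lt_of_lt_of_le hj (hlen r hr))]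
    rfl
  rw [h5]
  -- step 6: the final transpose and the comparison loops
  have h6 : pyTranspose ((List.range M).map (fun j => (List.range N).map (fun k =>
        min (rmaxC board k) (cmaxC board j))))
      = (List.range N).map (fun k => (List.range M).map (fun j =>
          min (rmaxC board k) (cmaxC board j))) := by
    rw [pyTranspose_rect N _ (by apply List.ne_nil_of_length_pos; simpa using hmz)
      (by intro r hr; simp only [List.mem_map] at hr; obtain ⟨j, _, rfl⟩ := hr; simp)]
    apply map_range_congr
    intro k hk
    rw [List.map_map]
    apply map_range_congr
    intro j hj
    simp only [Function.comp_apply]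
    rw [List.getD_eq_getElem _ _ (by simpa using hk), List.getElem_map, List.getElem_range]
  rw [h6]
  apply any_range_congr
  intro k hk
  simp only [Function.comp_apply]
  apply any_range_congr
  intro j hj
  simp only [Function.comp_apply]
  apply bool_eq_of_iff
  simp only [decide_eq_true_eq, PySem.List.pyGetD_natCast]
  have hfin : (((List.range N).map (fun k => (List.range M).map (fun j =>
        min (rmaxC board k) (cmaxC board j)))).getD k []).getD j 0
      = min (rmaxC board k) (cmaxC board j) := by
    simp [List.getD_eq_getElem?_getD, List.getElem?_map, List.getElem?_range hk,
      List.getElem?_range hj]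
  rw [hfin, ne_comm]

-- an existence-of-greater test equals a strict comparison with the maximum (nonempty list)
theorem any_gt_eq_lt_max (l : List Int) (v : Int) (hne : l ≠ []) :
    l.any (fun x => decide (v < x)) = decide (v < (PySem.List.max? l (fun x => x)).getD 0) := by
  obtain ⟨mx, hmx⟩ : ∃ mx, PySem.List.max? l (fun x => x) = some mx := by
    cases h : PySem.List.max? l (fun x => x) with
    | none => exact absurd ((PySem.List.max?_eq_none_iff _ _).mp h) hne
    | some mx => exact ⟨mx, rfl⟩
  have hmem := PySem.List.max?_mem hmx
  have hmax := PySem.List.max?_isMax hmx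
  rw [hmx]
  apply bool_eq_of_iff
  simp only [List.any_eq_true, decide_eq_true_eq, Option.getD_some]
  constructor
  · rintro ⟨x, hx, hlt⟩; exact lt_of_lt_of_le hlt (hmax x hx)
  · intro h; exact ⟨mx, hmem, h⟩

-- port B computes the canonical mismatch test
theorem solveB_canon (N M : Nat) (board : List (List Int))
    (hNL : N ≤ board.length) (hlen : ∀ r ∈ board, M ≤ r.length)
    (hnz : 0 < N) (_hmz : 0 < M) :
    solve_alt (N : Int) (M : Int) board = if mismatchC N M board then "NO" else "YES" := by
  have hbne : board ≠ [] := List.ne_nil_of_length_pos (by omega)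
  simp only [solve_alt, mismatchC]
  congr 1
  apply congrArg (fun b : Bool => b = true)
  simp only [PySem.List.pyRange_zero_natCast, List.any_map]
  apply any_range_congr
  intro k hk
  simp only [Function.comp_apply]
  apply any_range_congr
  intro j hj
  simp only [Function.comp_apply, PySem.List.pyGet?_natCast, PySem.List.pyGetD_natCast]
  have hkl : k < board.length := by omega
  have hrow : (board[k]?).getD [] = board.getD k [] := by
    simp [List.getD_eq_getElem?_getD]
  rw [hrow]
  set r := board.getD k [] with hr
  have hrmem : r ∈ board := by
    rw [hr, List.getD_eq_getElem _ _ hkl]; exact List.getElem_mem hkl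
  have hrlen : M ≤ r.length := hlen r hrmem
  set v := r.getD j 0 with hv
  have hrne : r ≠ [] := by
    apply List.ne_nil_of_length_pos; omega
  -- the j-th materialized column is the j-th column of the board
  have hcols : (List.map (fun x : Int => board.map (fun rr => PySem.List.pyGetD rr x 0))
        (List.map (fun kk : Nat => (kk : Int)) (List.range M))).getD j []
      = board.map (fun rr => rr.getD j 0) := by
    rw [List.map_map, List.getD_eq_getElem _ _ (by simpa using hj)]
    simp
  rw [hcols, List.any_map]
  -- row test
  have hR : (r.any fun x => decide (v < x)) = decide (v < rmaxC board k) := by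
    rw [any_gt_eq_lt_max r v hrne]; rfl
  -- column test
  have hcol : (board.any fun rr => decide ((rr.getD j 0 : Int) > v))
      = decide (v < cmaxC board j) := by
    have := any_gt_eq_lt_max (board.map (fun rr => rr.getD j 0)) v (by simpa using hbne)
    rw [List.any_map] at this
    simpa [cmaxC, Function.comp] using this
  have hRa : (r.any fun x => decide (x > v)) = (r.any fun x => decide (v < x)) := rfl
  simp only [Function.comp_def]
  rw [hRa, hR, hcol]
  -- v ≤ rmax and v ≤ cmax, so (v < rmax && v < cmax) = (v ≠ min rmax cmax)
  have hvr : v ≤ rmaxC board k := by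
    obtain ⟨mx, hmx⟩ : ∃ mx, PySem.List.max? r (fun x => x) = some mx := by
      cases h : PySem.List.max? r (fun x => x) with
      | none => exact absurd ((PySem.List.max?_eq_none_iff _ _).mp h) hrne
      | some mx => exact ⟨mx, rfl⟩
    have hmax := PySem.List.max?_isMax hmx
    have hvmem : v ∈ r := by
      rw [hv, List.getD_eq_getElem _ _ (by omega)]
      exact List.getElem_mem (by omega)
    have := hmax v hvmem
    simp only [rmaxC, ← hr, hmx, Option.getD_some]
    exact this
  have hvc : v ≤ cmaxC board j := by
    set c := board.map (fun rr => rr.getD j 0) with hc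
    have hcne : c ≠ [] := by simpa [hc] using hbne
    obtain ⟨mx, hmx⟩ : ∃ mx, PySem.List.max? c (fun x => x) = some mx := by
      cases h : PySem.List.max? c (fun x => x) with
      | none => exact absurd ((PySem.List.max?_eq_none_iff _ _).mp h) hcne
      | some mx => exact ⟨mx, rfl⟩
    have hmax := PySem.List.max?_isMax hmx
    have hvmem : v ∈ c := by
      rw [hc, hv]
      exact List.mem_map.mpr ⟨r, hrmem, rfl⟩
    have := hmax v hvmem
    simp only [cmaxC, ← hc, hmx, Option.getD_some]
    exact this
  apply bool_eq_of_iff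
  simp only [Bool.and_eq_true, decide_eq_true_eq]
  constructor
  · rintro ⟨h1, h2⟩; omega
  · intro h
    simp only [min_def] at h
    split_ifs at h <;> constructor <;> omega

-- ===== VERDICT (by name: the statement is the Claim_ definition above) =====
theorem solve_spec : Claim_equal_solve := by
  intro n m board _ hpre
  obtain ⟨h1, h2, h3⟩ := hpre
  unfold Spec_solve
  by_cases hn : n ≤ 0
  · have he : PySem.List.pyRange 0 n 1 = [] := PySem.List.pyRange_one_eq_nil hn
    simp [solve, solve_alt, he]
  · by_cases hm : m ≤ 0
    · have he : PySem.List.pyRange 0 m 1 = [] := PySem.List.pyRange_one_eq_nil hm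
      simp [solve, solve_alt, he]
    · have hn' : n = ((n.toNat : Nat) : Int) := by omega
      have hm' : m = ((m.toNat : Nat) : Int) := by omega
      rw [hn', hm']
      rw [solveA_canon n.toNat m.toNat board (by omega)
          (fun r hr => by have := (h3 (by omega)).2 r hr; omega) (by omega) (by omega),
        solveB_canon n.toNat m.toNat board (by omega)
          (fun r hr => by have := (h3 (by omega)).2 r hr; omega) (by omega) (by omega)]
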